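-- pv_equiv track=rewrite | github.com/qs956/logic-reconstruction-of-handwritten-formula | rebuil.py | list_insert
-- ===== SOURCE A (Python) =====
-- def list_insert(l,obj1,obj2):
-- 	#在列表l对象obj1的后面插入对象列表obj2
-- 	pos = 0
-- 	for i in range(len(l)):
-- 		if (l[i] == obj1):
-- 			pos = i+1
-- 			break
-- 	for i in range(len(obj2)-1,-1,-1):
-- 		l.insert(pos,obj2[i])
-- 	return l
-- ===== SOURCE B (Python) =====
-- def list_insert(l, obj1, obj2):
--     # One forward pass: copy elements, splice obj2 after the first obj1;
--     # if obj1 never occurs, prepend obj2 (A's pos=0 behaviour). Mutates l in place like A.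
--     result = []
--     found = False
--     for x in l:
--         result.append(x)
--         if not found and x == obj1:
--             result.extend(obj2)
--             found = True
--     if not found:
--         result = list(obj2) + result
--     l[:] = result
--     return l
-- ===== Notes on version B (the rewrite author's own statement) =====
-- stated objective: faster
-- what changed: Replaces the index-search loop plus len(obj2) separate list.insert calls (each shifting the tail) by a single forward pass that builds the result once with a found flag, then writes it back with l[:]=result.
import Mathlib
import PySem

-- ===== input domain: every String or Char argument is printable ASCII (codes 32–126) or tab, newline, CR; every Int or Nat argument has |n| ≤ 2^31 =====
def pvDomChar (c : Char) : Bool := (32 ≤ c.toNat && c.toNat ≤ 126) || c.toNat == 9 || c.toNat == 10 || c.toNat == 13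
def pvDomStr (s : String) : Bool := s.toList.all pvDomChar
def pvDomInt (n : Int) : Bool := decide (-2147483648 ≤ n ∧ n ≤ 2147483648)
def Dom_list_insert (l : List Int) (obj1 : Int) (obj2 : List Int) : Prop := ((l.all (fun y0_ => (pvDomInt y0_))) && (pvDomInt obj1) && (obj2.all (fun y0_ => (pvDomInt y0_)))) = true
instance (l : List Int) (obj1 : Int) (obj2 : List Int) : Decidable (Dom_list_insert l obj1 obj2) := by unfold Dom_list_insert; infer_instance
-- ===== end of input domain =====

-- B replaces A's position-search loop + repeated list.insert calls by one forward pass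
-- with a found flag (faster: builds the result once); B mutates l via l[:]=result just as A does.


-- ===== PORT A =====
-- first loop of A: scan indices left to right, pos = i+1 at the first hit, else pos stays 0
def pvFindPosA : List Int → Int → Nat → Nat
  | [], _, _ => 0
  | x :: xs, obj1, i => if x == obj1 then i + 1 else pvFindPosA xs obj1 (i + 1)

def list_insert (l : List Int) (obj1 : Int) (obj2 : List Int) : List Int :=
  let pos : Nat := pvFindPosA l obj1 0
  -- second loop: for i in range(len(obj2)-1, -1, -1): l.insert(pos, obj2[i])
  (List.range obj2.length).reverse.foldl
    (fun acc i => PySem.List.insert acc (pos : Int) (obj2.getD i 0)) l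

-- ===== PORT B =====
def pvStepB (obj1 : Int) (obj2 : List Int) (st : List Int × Bool) (x : Int) : List Int × Bool :=
  if !st.2 && x == obj1 then (st.1 ++ [x] ++ obj2, true) else (st.1 ++ [x], st.2)

def list_insert_alt (l : List Int) (obj1 : Int) (obj2 : List Int) : List Int :=
  let st := l.foldl (pvStepB obj1 obj2) ([], false)
  if st.2 then st.1 else obj2 ++ st.1

-- ===== PRECONDITION & SPEC =====
def Spec_list_insert (l : List Int) (obj1 : Int) (obj2 : List Int) (out : List Int) : Prop := out = list_insert_alt l obj1 obj2
instance (l : List Int) (obj1 : Int) (obj2 : List Int) (out : List Int) : Decidable (Spec_list_insert l obj1 obj2 out) := by unfold Spec_list_insert; infer_instance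

-- ===== CLAIM (what is proved, stated in full; the proofs are below) =====
def Claim_equal_list_insert : Prop := ∀ (l : List Int) (obj1 : Int) (obj2 : List Int), Dom_list_insert l obj1 obj2 → Spec_list_insert l obj1 obj2 (list_insert l obj1 obj2)

-- ===== LEMMAS AND PROOFS =====

theorem pvFindPosA_le (xs : List Int) (obj1 : Int) (i : Nat) :
    pvFindPosA xs obj1 i ≤ i + xs.length := by
  induction xs generalizing i with
  | nil => simp [pvFindPosA]
  | cons x xs ih =>
    simp only [pvFindPosA]
    split
    · simp
    · have := ih (i + 1); simp at *; omega

theorem pvFindPosA_shift (xs : List Int) (obj1 : Int) (i : Nat) (h : obj1 ∈ xs) :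
    pvFindPosA xs obj1 (i + 1) = pvFindPosA xs obj1 i + 1 := by
  induction xs generalizing i with
  | nil => simp at h
  | cons x xs ih =>
    simp only [pvFindPosA]
    split
    · rfl
    · rename_i hne
      have hx : x ≠ obj1 := by simpa using hne
      have hm : obj1 ∈ xs := by
        rcases List.mem_cons.mp h with h1 | h1
        · exact absurd h1.symm hx
        · exact h1
      exact ih (i + 1) hm

theorem pvFindPosA_not_mem (xs : List Int) (obj1 : Int) (i : Nat) (h : obj1 ∉ xs) :
    pvFindPosA xs obj1 i = 0 := by
  induction xs generalizing i with
  | nil => rfl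
  | cons x xs ih =>
    simp only [pvFindPosA]
    rw [if_neg (by simp at h ⊢; exact fun e => h.1 e.symm)]
    exact ih (i + 1) (by simp at h; exact fun e => h.2 e)

-- the back-to-front insert loop splices the whole mapped range at position p
theorem insert_fold (f : Nat → Int) (n : Nat) (l : List Int) (p : Nat) (hp : p ≤ l.length) :
    (List.range n).reverse.foldl (fun acc i => PySem.List.insert acc (p : Int) (f i)) l
      = l.take p ++ (List.range n).map f ++ l.drop p := by
  induction n generalizing l with
  | zero => simp
  | succ n ih =>
    rw [List.range_succ, List.reverse_append]
    simp only [List.reverse_singleton, List.singleton_append, List.foldl_cons]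
    rw [PySem.List.insert_natCast l p (f n) hp]
    have hlen : p ≤ (l.take p ++ f n :: l.drop p).length := by
      simp; omega
    rw [ih _ hlen]
    have htk : (l.take p).length = p := by simp; omega
    rw [List.take_append_of_le_length (by omega), List.take_of_length_le (by omega),
        List.drop_append_of_le_length (by omega), List.drop_of_length_le (by omega)]
    simp [List.map_append]

theorem map_getD_range (obj2 : List Int) :
    (List.range obj2.length).map (fun i => obj2.getD i 0) = obj2 := by
  apply List.ext_getElem
  · simp
  · intro i h1 h2
    simp [List.getD_eq_getElem?_getD, List.getElem?_eq_getElem h2]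

theorem foldB_true (obj1 : Int) (obj2 : List Int) (xs : List Int) (acc : List Int) :
    xs.foldl (pvStepB obj1 obj2) (acc, true) = (acc ++ xs, true) := by
  induction xs generalizing acc with
  | nil => simp
  | cons x xs ih => simp [pvStepB, ih]

theorem foldB_false (obj1 : Int) (obj2 : List Int) (xs : List Int) (acc : List Int) :
    xs.foldl (pvStepB obj1 obj2) (acc, false)
      = if obj1 ∈ xs then
          (acc ++ xs.take (pvFindPosA xs obj1 0) ++ obj2 ++ xs.drop (pvFindPosA xs obj1 0), true)
        else (acc ++ xs, false) := by
  induction xs generalizing acc with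
  | nil => simp
  | cons x xs ih =>
    simp only [List.foldl_cons, pvStepB]
    by_cases hx : x = obj1
    · subst hx
      simp only [Bool.not_false, BEq.rfl, Bool.and_self, if_pos]
      rw [foldB_true]
      rw [if_pos (List.mem_cons_self)]
      simp [pvFindPosA]
    · rw [if_neg (by simp [hx])]
      rw [ih]
      by_cases hm : obj1 ∈ xs
      · rw [if_pos hm, if_pos (List.mem_cons_of_mem _ hm)]
        have : pvFindPosA (x :: xs) obj1 0 = pvFindPosA xs obj1 0 + 1 := by
          simp only [pvFindPosA]
          rw [if_neg (by simp [hx])]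
          exact pvFindPosA_shift xs obj1 0 hm
        simp [this]
      · rw [if_neg hm, if_neg (by simp [hm, Ne.symm hx])]
        simp

-- ===== VERDICT (by name: the statement is the Claim_ definition above) =====
theorem list_insert_spec : Claim_equal_list_insert := by
  intro l obj1 obj2 _
  unfold Spec_list_insert list_insert list_insert_alt
  have hp : pvFindPosA l obj1 0 ≤ l.length := by
    have := pvFindPosA_le l obj1 0; omega
  rw [insert_fold (fun i => obj2.getD i 0) obj2.length l _ hp, map_getD_range]
  rw [foldB_false]
  by_cases hm : obj1 ∈ l
  · simp [hm]
  · rw [if_neg hm]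
    simp [pvFindPosA_not_mem l obj1 0 hm]
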